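-- pv_equiv track=rewrite | github.com/sateigen/mystery-word | mystery_word.py | is_word_complete
-- ===== SOURCE A (Python) =====
-- def is_word_complete(word, guesses):
--     complete_word = []
--     for letter in word:
--         if letter in guesses:
--             complete_word.append(letter)
--     complete_word = sorted(complete_word)
--     word = sorted(list(word))
--     if complete_word == word:
--         return True
--     else:
--         return False
-- ===== SOURCE B (Python) =====
-- def is_word_complete(word, guesses):
--     return all(letter in guesses for letter in word)
-- ===== Notes on version B (the rewrite author's own statement) =====
-- stated objective: simpler
-- what changed: Replaces building a filtered list, sorting both it and the word, and comparing, with a single short-circuiting membership pass over the word (no lists built, no sorting).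
import Mathlib
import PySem

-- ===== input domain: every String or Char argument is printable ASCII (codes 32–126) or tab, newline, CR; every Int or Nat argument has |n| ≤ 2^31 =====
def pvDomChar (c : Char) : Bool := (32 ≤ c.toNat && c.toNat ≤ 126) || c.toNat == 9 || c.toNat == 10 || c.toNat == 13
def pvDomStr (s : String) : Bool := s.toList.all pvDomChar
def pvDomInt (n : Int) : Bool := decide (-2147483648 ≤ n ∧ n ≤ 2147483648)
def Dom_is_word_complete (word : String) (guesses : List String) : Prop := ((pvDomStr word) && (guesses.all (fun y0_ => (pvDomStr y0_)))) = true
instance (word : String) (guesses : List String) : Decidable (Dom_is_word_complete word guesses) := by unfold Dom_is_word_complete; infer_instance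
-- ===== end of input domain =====

-- B replaces A's build-filter-sort-and-compare with a single short-circuiting membership scan; return value only, no side effects.

-- ===== PORT A =====
def is_word_complete (word : String) (guesses : List String) : Bool :=
  let complete_word : List Char :=
    word.toList.foldl (fun acc letter =>
      if guesses.contains (String.mk [letter]) then acc ++ [letter] else acc) []
  let complete_word := PySem.List.sorted complete_word (fun x => x) false
  let word' := PySem.List.sorted word.toList (fun x => x) false
  if complete_word == word' then true else false

-- ===== PORT B =====
def is_word_complete_alt (word : String) (guesses : List String) : Bool :=
  word.toList.all (fun letter => guesses.contains (String.mk [letter]))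

-- ===== PRECONDITION & SPEC =====
def Spec_is_word_complete (word : String) (guesses : List String) (out : Bool) : Prop := out = is_word_complete_alt word guesses
instance (word : String) (guesses : List String) (out : Bool) : Decidable (Spec_is_word_complete word guesses out) := by unfold Spec_is_word_complete; infer_instance

-- ===== CLAIM (what is proved, stated in full; the proofs are below) =====
def Claim_equal_is_word_complete : Prop := ∀ (word : String) (guesses : List String), Dom_is_word_complete word guesses → Spec_is_word_complete word guesses (is_word_complete word guesses)

-- ===== LEMMAS AND PROOFS =====

theorem filter_eq_self_of_perm {l : List Char} {p : Char → Bool}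
    (h : (l.filter p).Perm l) : l.filter p = l := by
  have hlen : (l.filter p).length = l.length := h.length_eq
  exact List.Sublist.eq_of_length (l.filter_sublist) hlen

-- ===== VERDICT (by name: the statement is the Claim_ definition above) =====
theorem is_word_complete_spec : Claim_equal_is_word_complete := by
  intro word guesses _
  unfold Spec_is_word_complete is_word_complete is_word_complete_alt
  simp only [PySem.List.foldl_append_if_eq_filter, List.nil_append]
  set p : Char → Bool := fun letter => guesses.contains (String.mk [letter]) with hp
  by_cases h : word.toList.filter p = word.toList
  · rw [h, if_pos (beq_self_eq_true _)]
    exact (List.all_eq_true.mpr (List.filter_eq_self.mp h)).symm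
  · have hall : word.toList.all p = false := by
      rw [← Bool.not_eq_true, List.all_eq_true]
      intro hforall
      exact h (List.filter_eq_self.mpr hforall)
    rw [hall, if_neg]
    intro heq
    exact h (filter_eq_self_of_perm
      ((PySem.List.sorted_id_eq_sorted_id_iff_perm _ _).mp (eq_of_beq heq)))
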